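-- pv_equiv track=rewrite | github.com/JNemune/MineSweeperEngine | minesweeper1.2.2.1.py | common_neighbor_finder
-- ===== SOURCE A (Python) =====
-- def neighbor (x): #finding neighbors of x (line, column) house
--     out = list ()
--     (line, column) = x
--     for neighbor_line in [-1, 0, 1]:
--         for neighbor_column in [-1, 0, 1]:
--             if 8 > line + neighbor_line >= 0 and 7 > column + neighbor_column >= 0 and (neighbor_line, neighbor_column) != (0, 0):
--                 out.append ((line + neighbor_line, column + neighbor_column))
--     return out
--
-- def common_neighbor_finder (inp): #finding common neighbors between houses in inp
--     out = list ()
--     neighbors_list = list ()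
--     for i in inp:
--         neighbors_list.append (neighbor (i))
--     for i in neighbors_list [0]:
--         x = 0
--         for j in range (1, len (inp)):
--             if not (i in neighbors_list [j]):
--                 x = 1
--                 break
--         if x == 0:
--             out.append (i)
--     return (out)
-- ===== SOURCE B (Python) =====
-- DELTAS = [(-1, -1), (-1, 0), (-1, 1), (0, -1), (0, 0), (0, 1), (1, -1), (1, 0), (1, 1)]
--
-- def _neighbors(cell):
--     line, column = cell
--     return [(line + dl, column + dc) for (dl, dc) in DELTAS
--             if 8 > line + dl >= 0 and 7 > column + dc >= 0 and (dl, dc) != (0, 0)]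
--
-- def common_neighbor_finder(inp):
--     # tally: how many input cells have c as a neighbor
--     count = {}
--     for cell in inp:
--         for c in _neighbors(cell):
--             count[c] = count.get(c, 0) + 1
--     n = len(inp)
--     # a cell is common iff every input cell contributed one tally for it;
--     # iterate over the first cell's neighbors to keep A's order (raises on empty inp like A)
--     return [c for c in _neighbors(inp[0]) if count.get(c, 0) == n]
-- ===== Notes on version B (the rewrite author's own statement) =====
-- stated objective: alternative
-- what changed: Replaces the per-candidate inner scan over all neighbor lists by a single tally pass (dict counter over all neighbors), then one filter over the first cell's neighbor list keeping cells counted len(inp) times.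
import Mathlib
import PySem

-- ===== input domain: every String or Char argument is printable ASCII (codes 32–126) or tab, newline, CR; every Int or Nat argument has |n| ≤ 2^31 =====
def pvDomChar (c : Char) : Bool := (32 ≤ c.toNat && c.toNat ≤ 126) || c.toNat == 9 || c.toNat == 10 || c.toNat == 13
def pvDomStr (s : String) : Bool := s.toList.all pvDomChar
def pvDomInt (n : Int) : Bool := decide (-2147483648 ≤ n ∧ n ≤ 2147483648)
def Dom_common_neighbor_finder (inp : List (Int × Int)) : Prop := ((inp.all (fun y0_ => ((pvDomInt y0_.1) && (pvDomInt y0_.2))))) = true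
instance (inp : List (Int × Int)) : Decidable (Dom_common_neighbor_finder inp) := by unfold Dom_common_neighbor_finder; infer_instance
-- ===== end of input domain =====

-- B replaces A's per-candidate scans over all neighbor lists by one tally pass (a dict counter)
-- followed by a single filter over the first cell's neighbor list (objective: alternative).
-- ===== PORT A =====
def neighborA (x : Int × Int) : List (Int × Int) :=
  ([-1, 0, 1] : List Int).foldl (fun out nl =>
    ([-1, 0, 1] : List Int).foldl (fun out nc =>
      if 8 > x.1 + nl ∧ x.1 + nl ≥ 0 ∧ 7 > x.2 + nc ∧ x.2 + nc ≥ 0 ∧ (nl, nc) ≠ ((0 : Int), (0 : Int))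
      then out ++ [(x.1 + nl, x.2 + nc)] else out) out) []

def common_neighbor_finder (inp : List (Int × Int)) : List (Int × Int) :=
  let neighbors_list := inp.map neighborA
  -- 'neighbors_list[0]' raises IndexError on empty inp; excluded by Pre_ (pyGetD default [])
  (PySem.List.pyGetD neighbors_list 0 []).foldl (fun out i =>
    let x : Int := (PySem.List.pyRange 1 inp.length 1).foldl (fun x j =>
      if x ≠ 0 then x
      else if ¬ (i ∈ PySem.List.pyGetD neighbors_list j []) then 1 else x) 0
    if x = 0 then out ++ [i] else out) []

-- ===== PORT B =====
def pvDeltas : List (Int × Int) := [(-1, -1), (-1, 0), (-1, 1), (0, -1), (0, 0), (0, 1), (1, -1), (1, 0), (1, 1)]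

def neighborB (cell : Int × Int) : List (Int × Int) :=
  (pvDeltas.filter (fun d =>
      decide (8 > cell.1 + d.1 ∧ cell.1 + d.1 ≥ 0 ∧ 7 > cell.2 + d.2 ∧ cell.2 + d.2 ≥ 0 ∧ (d.1, d.2) ≠ ((0 : Int), (0 : Int))))).map
    (fun d => (cell.1 + d.1, cell.2 + d.2))

def common_neighbor_finder_alt (inp : List (Int × Int)) : List (Int × Int) :=
  let count : PySem.Dict (Int × Int) Int :=
    inp.foldl (fun d cell => (neighborB cell).foldl (fun d c => d.insert c (d.getD c 0 + 1)) d) PySem.Dict.empty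
  let n : Int := inp.length
  -- 'inp[0]' raises IndexError on empty inp; excluded by Pre_ (pyGetD default (0,0))
  (neighborB (PySem.List.pyGetD inp 0 ((0 : Int), (0 : Int)))).filter (fun c => count.getD c 0 == n)

-- ===== PRECONDITION & SPEC =====
-- Pre_ excludes only the empty list, on which the Python A raises IndexError (neighbors_list[0]).
def Pre_common_neighbor_finder (inp : List (Int × Int)) : Prop := inp ≠ []
instance (inp : List (Int × Int)) : Decidable (Pre_common_neighbor_finder inp) := by
  unfold Pre_common_neighbor_finder; infer_instance
def pvWitness_common_neighbor_finder : (List (Int × Int)) := [((1 : Int), (1 : Int)), ((1 : Int), (2 : Int))]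

def Spec_common_neighbor_finder (inp : List (Int × Int)) (out : List (Int × Int)) : Prop := out = common_neighbor_finder_alt inp
instance (inp : List (Int × Int)) (out : List (Int × Int)) : Decidable (Spec_common_neighbor_finder inp out) := by unfold Spec_common_neighbor_finder; infer_instance

-- ===== CLAIM (what is proved, stated in full; the proofs are below) =====
def Claim_equal_common_neighbor_finder : Prop := ∀ (inp : List (Int × Int)), Dom_common_neighbor_finder inp → Pre_common_neighbor_finder inp → Spec_common_neighbor_finder inp (common_neighbor_finder inp)

-- ===== LEMMAS AND PROOFS =====

lemma foldl_append_ite_map {α β : Type} (P : α → Prop) [DecidablePred P] (f : α → β) (l : List α) (acc : List β) :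
    l.foldl (fun acc x => if P x then acc ++ [f x] else acc) acc
      = acc ++ (l.filter (fun x => decide (P x))).map f := by
  induction l generalizing acc with
  | nil => simp
  | cons h t ih => by_cases hP : P h <;> simp [List.foldl_cons, hP, ih]

lemma pvDeltas_eq : pvDeltas
    = ([-1, 0, 1] : List Int).flatMap (fun nl => ([-1, 0, 1] : List Int).map (fun nc => (nl, nc))) := by
  decide

lemma neighbor_eq (x : Int × Int) : neighborA x = neighborB x := by
  unfold neighborA neighborB
  rw [show (fun (out : List (Int × Int)) (nl : Int) =>
        ([-1, 0, 1] : List Int).foldl (fun out nc =>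
          if 8 > x.1 + nl ∧ x.1 + nl ≥ 0 ∧ 7 > x.2 + nc ∧ x.2 + nc ≥ 0 ∧ (nl, nc) ≠ ((0 : Int), (0 : Int))
          then out ++ [(x.1 + nl, x.2 + nc)] else out) out)
      = (fun out nl => out ++ (([-1, 0, 1] : List Int).filter (fun nc =>
          decide (8 > x.1 + nl ∧ x.1 + nl ≥ 0 ∧ 7 > x.2 + nc ∧ x.2 + nc ≥ 0 ∧ (nl, nc) ≠ ((0 : Int), (0 : Int))))).map
          (fun nc => (x.1 + nl, x.2 + nc)))
      from funext fun out => funext fun nl => foldl_append_ite_map _ _ _ _]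
  rw [PySem.List.foldl_append_eq_flatMap, List.nil_append, pvDeltas_eq,
    List.filter_flatMap, List.map_flatMap]
  congr 1
  funext nl
  rw [List.filter_map, List.map_map]
  simp [Function.comp_def, Prod.mk.injEq, Bool.not_and, decide_not]

lemma nodup_neighborB (x : Int × Int) : (neighborB x).Nodup := by
  refine List.Nodup.map ?_ (List.Nodup.filter _ (by decide))
  intro a b h
  have h1 : x.1 + a.1 = x.1 + b.1 := congrArg Prod.fst h
  have h2 : x.2 + a.2 = x.2 + b.2 := congrArg Prod.snd h
  exact Prod.ext (by omega) (by omega)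

lemma countB_le_one (x c : Int × Int) : (neighborB x).count c ≤ 1 :=
  List.nodup_iff_count_le_one.mp (nodup_neighborB x) c

lemma count_flat_le (ys : List (Int × Int)) (c : Int × Int) :
    (ys.flatMap neighborB).count c ≤ ys.length := by
  induction ys with
  | nil => simp
  | cons h t ih =>
    simp only [List.flatMap_cons, List.count_append, List.length_cons]
    have := countB_le_one h c
    omega

lemma count_flat_eq_iff (ys : List (Int × Int)) (c : Int × Int) :
    (ys.flatMap neighborB).count c = ys.length ↔ ∀ y ∈ ys, c ∈ neighborB y := by
  induction ys with
  | nil => simp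
  | cons h t ih =>
    simp only [List.flatMap_cons, List.count_append, List.length_cons, List.mem_cons]
    have h1 := countB_le_one h c
    have h2 := count_flat_le t c
    constructor
    · intro he y hy
      have hh : (neighborB h).count c = 1 := by omega
      have ht : (t.flatMap neighborB).count c = t.length := by omega
      rcases hy with rfl | hy
      · exact List.count_pos_iff.mp (by omega)
      · exact (ih.mp ht) y hy
    · intro hall
      have hh : (neighborB h).count c = 1 := by
        have := List.count_pos_iff.mpr (hall h (Or.inl rfl))
        omega
      have ht := ih.mpr (fun y hy => hall y (Or.inr hy))
      omega

lemma foldl_flag {α : Type} (P : α → Prop) [DecidablePred P] (L : List α) (s : Int) :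
    L.foldl (fun x j => if x ≠ 0 then x else if ¬ P j then 1 else x) s
      = if s = 0 then (if ∀ j ∈ L, P j then 0 else 1) else s := by
  induction L generalizing s with
  | nil => by_cases hs : s = 0 <;> simp [hs]
  | cons h t ih =>
    rw [List.foldl_cons, ih]
    by_cases hs : s = 0
    · subst hs
      by_cases hP : P h
      · simp [hP]
      · simp [hP]
    · simp [hs]

lemma foldl_congr' {α β : Type} {f g : β → α → β} {l : List α} {init : β}
    (h : ∀ acc, ∀ x ∈ l, f acc x = g acc x) : l.foldl f init = l.foldl g init := by
  induction l generalizing init with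
  | nil => rfl
  | cons a t ih =>
    rw [List.foldl_cons, List.foldl_cons, h init a (List.mem_cons_self ..)]
    exact ih (fun acc x hx => h acc x (List.mem_cons_of_mem _ hx))

lemma foldl_flag_zero {α : Type} (P : α → Prop) [DecidablePred P] (L : List α) :
    L.foldl (fun (x : Int) j => if x ≠ 0 then x else if ¬ P j then 1 else x) 0
      = if ∀ j ∈ L, P j then (0 : Int) else 1 := by
  exact (foldl_flag P L 0).trans (if_pos rfl)

-- ===== VERDICT (by name: the statement is the Claim_ definition above) =====
theorem common_neighbor_finder_spec : Claim_equal_common_neighbor_finder := by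
  intro inp _ hpre
  unfold Spec_common_neighbor_finder
  match inp with
  | [] => exact absurd rfl hpre
  | h :: t =>
    simp only [common_neighbor_finder, common_neighbor_finder_alt]
    have hget0A : PySem.List.pyGetD ((h :: t).map neighborA) 0 [] = neighborA h := by
      simp [PySem.List.pyGetD_ofNat']
    have hget0B : PySem.List.pyGetD (h :: t) 0 ((0 : Int), (0 : Int)) = h := by
      simp [PySem.List.pyGetD_ofNat']
    rw [hget0A, hget0B]
    rw [← List.foldl_flatMap, PySem.Dict.foldl_insert_getD_add_one_eq_counter]
    have hlen : ((h :: t : List (Int × Int)).length : Int)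
        = (((h :: t).map neighborA).length : Int) := by simp
    have hA : ∀ i : Int × Int,
        (PySem.List.pyRange 1 ((h :: t : List (Int × Int)).length : Int) 1).foldl
          (fun (x : Int) j => if x ≠ 0 then x
            else if ¬ (i ∈ PySem.List.pyGetD ((h :: t).map neighborA) j []) then 1 else x) 0
        = if ∀ nl ∈ t.map neighborA, i ∈ nl then 0 else 1 := by
      intro i
      rw [hlen, PySem.List.foldl_pyRange_pyGetD' ((h :: t).map neighborA) []
        (fun (x : Int) nl => if x ≠ 0 then x else if ¬ (i ∈ nl) then 1 else x) 0 (by norm_num)]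
      simp only [List.map_cons, Int.toNat_one, List.drop_succ_cons, List.drop_zero]
      exact foldl_flag_zero _ _
    refine Eq.trans (foldl_congr'
      (g := fun out i => if ∀ nl ∈ t.map neighborA, i ∈ nl then out ++ [i] else out) ?_) ?_
    · intro out i _
      show _ = if ∀ nl ∈ t.map neighborA, i ∈ nl then out ++ [i] else out
      refine if_congr ?_ rfl rfl
      refine Iff.trans (iff_of_eq (congrArg (· = (0 : Int)) (hA i))) ?_
      by_cases hall : ∀ nl ∈ t.map neighborA, i ∈ nl
      · rw [if_pos hall]
        exact iff_of_true rfl hall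
      · rw [if_neg hall]
        exact iff_of_false (by norm_num) hall
    · rw [PySem.List.foldl_append_ite_eq_filter (fun i => ∀ nl ∈ t.map neighborA, i ∈ nl) (neighborA h) [],
        List.nil_append, neighbor_eq h]
      refine List.filter_congr ?_
      intro c hc
      rw [PySem.Dict.getD_counter, Bool.eq_iff_iff]
      simp only [decide_eq_true_eq, beq_iff_eq, Int.natCast_inj]
      rw [count_flat_eq_iff]
      constructor
      · intro hall y hy
        rcases List.mem_cons.mp hy with rfl | hy
        · exact hc
        · have := hall (neighborA y) (List.mem_map_of_mem hy)
          rwa [neighbor_eq y] at this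
      · intro hall nl hnl
        obtain ⟨y, hy, rfl⟩ := List.mem_map.mp hnl
        rw [neighbor_eq y]
        exact hall y (List.mem_cons_of_mem _ hy)
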